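-- pv_equiv track=rewrite | github.com/arth758/fatec | 1º Semestre/Lab. Banco de Dados/PROJETO FINAL/checker/algoritmo/alg.py | repeticao
-- ===== SOURCE A (Python) =====
-- def repeticao(lista, cont):
--     for barco_1 in lista:
--         for barco_2 in lista:
--             for elemento_1 in barco_1:
--                 for elemento_2 in barco_2:
--                     if elemento_1 == elemento_2:
--                         cont += 1
--     return cont
-- ===== SOURCE B (Python) =====
-- def repeticao(lista, cont):
--     counts = {}
--     for barco in lista:
--         for e in barco:
--             counts[e] = counts.get(e, 0) + 1
--     return cont + sum(c * c for c in counts.values())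
-- ===== Notes on version B (the rewrite author's own statement) =====
-- stated objective: faster
-- what changed: Replaced the quadruple nested scan over all boat pairs by a single pass building a frequency dictionary of all elements and returning cont plus the sum of squared counts.
import Mathlib
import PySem

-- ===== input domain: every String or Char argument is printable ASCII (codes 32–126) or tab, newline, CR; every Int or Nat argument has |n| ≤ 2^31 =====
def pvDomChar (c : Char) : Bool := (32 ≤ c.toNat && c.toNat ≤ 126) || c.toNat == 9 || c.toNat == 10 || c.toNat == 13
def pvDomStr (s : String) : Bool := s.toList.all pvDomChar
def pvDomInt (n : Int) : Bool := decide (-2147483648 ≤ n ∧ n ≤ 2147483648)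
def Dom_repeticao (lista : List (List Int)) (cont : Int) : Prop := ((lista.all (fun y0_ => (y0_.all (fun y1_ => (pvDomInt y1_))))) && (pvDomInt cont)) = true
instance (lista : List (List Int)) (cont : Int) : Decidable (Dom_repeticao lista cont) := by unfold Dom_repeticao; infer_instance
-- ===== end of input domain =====

-- B builds a frequency dictionary in one pass and sums squared counts instead of
-- scanning all pairs of boats and element pairs (objective: faster, asymptotic).
-- ===== PORT A =====
def repeticao (lista : List (List Int)) (cont : Int) : Int :=
  lista.foldl (fun cont barco_1 =>
    lista.foldl (fun cont barco_2 =>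
      barco_1.foldl (fun cont elemento_1 =>
        barco_2.foldl (fun cont elemento_2 =>
          if elemento_1 == elemento_2 then cont + 1 else cont) cont) cont) cont) cont

-- ===== PORT B =====
def repeticao_alt (lista : List (List Int)) (cont : Int) : Int :=
  let counts : PySem.Dict Int Int :=
    lista.foldl (fun d barco =>
      barco.foldl (fun d e => d.insert e (d.getD e 0 + 1)) d) PySem.Dict.empty
  cont + counts.values.foldl (fun s c => s + c * c) 0

-- ===== PRECONDITION & SPEC =====
def Spec_repeticao (lista : List (List Int)) (cont : Int) (out : Int) : Prop := out = repeticao_alt lista cont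
instance (lista : List (List Int)) (cont : Int) (out : Int) : Decidable (Spec_repeticao lista cont out) := by unfold Spec_repeticao; infer_instance

-- ===== CLAIM (what is proved, stated in full; the proofs are below) =====
def Claim_equal_repeticao : Prop := ∀ (lista : List (List Int)) (cont : Int), Dom_repeticao lista cont → Spec_repeticao lista cont (repeticao lista cont)

-- ===== LEMMAS AND PROOFS =====

-- ===== VERDICT (by name: the statement is the Claim_ definition above) =====
-- innermost loop of A counts occurrences of elemento_1 in barco_2
theorem inner_count (b2 : List Int) (e1 : Int) (c : Int) :
    b2.foldl (fun cont e2 => if e1 == e2 then cont + 1 else cont) c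
      = c + (b2.count e1 : Int) := by
  induction b2 generalizing c with
  | nil => simp
  | cons x xs ih =>
    simp only [List.foldl_cons]
    rw [ih, List.count_cons]
    by_cases h : e1 = x
    · simp only [h, beq_self_eq_true, if_pos]
      push_cast
      ring
    · simp only [beq_iff_eq, h, if_false]
      have : ¬ x = e1 := fun hx => h hx.symm
      simp [this]

theorem loop3 (b1 b2 : List Int) (c : Int) :
    b1.foldl (fun cont e1 =>
      b2.foldl (fun cont e2 => if e1 == e2 then cont + 1 else cont) cont) c
      = c + (b1.map (fun e1 => (b2.count e1 : Int))).sum := by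
  induction b1 generalizing c with
  | nil => simp
  | cons x xs ih =>
    simp only [List.foldl_cons]
    rw [inner_count, ih, List.map_cons, List.sum_cons]
    ring

theorem loop2 (lista : List (List Int)) (b1 : List Int) (c : Int) :
    lista.foldl (fun cont b2 =>
      b1.foldl (fun cont e1 =>
        b2.foldl (fun cont e2 => if e1 == e2 then cont + 1 else cont) cont) cont) c
      = c + (b1.map (fun e1 => (lista.flatten.count e1 : Int))).sum := by
  induction lista generalizing c with
  | nil => simp
  | cons b2 rest ih =>
    simp only [List.foldl_cons, List.flatten_cons]
    rw [loop3, ih]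
    push_cast [List.count_append]
    rw [List.sum_map_add]
    ring

theorem loop1 (lista lista2 : List (List Int)) (c : Int) :
    lista.foldl (fun cont b1 =>
      lista2.foldl (fun cont b2 =>
        b1.foldl (fun cont e1 =>
          b2.foldl (fun cont e2 => if e1 == e2 then cont + 1 else cont) cont) cont) cont) c
      = c + (lista.map (fun b1 =>
          (b1.map (fun e1 => (lista2.flatten.count e1 : Int))).sum)).sum := by
  induction lista generalizing c with
  | nil => simp
  | cons b1 rest ih =>
    simp only [List.foldl_cons]
    rw [loop2, ih, List.map_cons, List.sum_cons]
    ring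

theorem repeticao_eq (lista : List (List Int)) (cont : Int) :
    repeticao lista cont
      = cont + (lista.flatten.map (fun e => (lista.flatten.count e : Int))).sum := by
  unfold repeticao
  rw [loop1]
  congr 1
  rw [List.map_flatten, List.sum_flatten, List.map_map]
  rfl

theorem foldl_nested_flatten {α β : Type} (L : List (List α)) (g : β → α → β) (d : β) :
    L.foldl (fun d b => b.foldl g d) d = L.flatten.foldl g d := by
  induction L generalizing d with
  | nil => rfl
  | cons b rest ih => simp [List.foldl_append, ih]

-- B's nested building loop is the counter of the flattened list
theorem counts_eq (lista : List (List Int)) :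
    lista.foldl (fun d barco =>
      barco.foldl (fun d e => d.insert e (d.getD e 0 + 1)) d) PySem.Dict.empty
      = PySem.Dict.counter lista.flatten := by
  rw [← PySem.Dict.foldl_insert_getD_add_one_eq_counter]
  rw [← foldl_nested_flatten]

theorem sum_sq (l : List Int) (s : Int) :
    l.foldl (fun s c => s + c * c) s = s + (l.map (fun c => c * c)).sum := by
  induction l generalizing s with
  | nil => simp
  | cons x xs ih =>
    simp only [List.foldl_cons, List.map_cons, List.sum_cons]
    rw [ih]
    ring

-- grouping: sum of counts over all occurrences = sum of squared counts over distinct values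
theorem sum_count_eq_sum_sq (l : List Int) :
    (l.map (fun e => (l.count e : Int))).sum
      = ((PySem.Set.ofList l).map (fun k => ((l.count k : Int) * (l.count k : Int)))).sum := by
  have hnd : (PySem.Set.ofList l).Nodup := PySem.Set.nodup_ofList l
  have hfin : (PySem.Set.ofList l).toFinset = l.toFinset := by
    apply Finset.ext
    intro x
    simp [List.mem_toFinset, PySem.Set.mem_ofList]
  rw [Finset.sum_list_map_count l (fun e => (l.count e : Int))]
  rw [← List.sum_toFinset _ hnd, hfin]
  apply Finset.sum_congr rfl
  intro x _
  simp

theorem repeticao_spec : Claim_equal_repeticao := by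
  intro lista cont _
  unfold Spec_repeticao repeticao_alt
  rw [counts_eq, repeticao_eq, sum_count_eq_sum_sq]
  show cont + _ = cont + (PySem.Dict.counter lista.flatten).values.foldl (fun s c => s + c * c) 0
  rw [sum_sq]
  have hv : (PySem.Dict.counter lista.flatten).values
      = (PySem.Set.ofList lista.flatten).map (fun k => (lista.flatten.count k : Int)) := by
    simp [PySem.Dict.values, PySem.Dict.items_counter, List.map_map]
  rw [hv, List.map_map]
  simp [Function.comp_def]
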